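-- pv_equiv track=rewrite | github.com/Vasileios-Pistikopoulos/DataManagement1 | ΑΣΚΗΣΗ 1 - Ιστογράμματα/1.1.py | equidepth
-- ===== SOURCE A (Python) =====
-- def equidepth(ages, bins):
--     sorted_ages = sorted(ages)# πρεπει να ειναι ταξινομημενες για να βρουμε τα ορια των bins
--     n = len(sorted_ages)
--
--     base_size = n // bins
--     remainder = n % bins #αν δεν διαιρειται ακριβως, τα πρωτα 'remainder' bins θα εχουν ενα στοιχειο παραπανω
--
--     boundaries = []#ορια
--     sizes = []#ποσα στοιχεια σε καθε bin
--     index = 0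
--
--     for i in range(bins - 1):
--         size = base_size + (1 if i < remainder else 0)
--         index += size
--         sizes.append(size)
--         boundaries.append(sorted_ages[index - 1])  # τελευταία τιμή του bin
--
--     # τελευταίο bin
--     sizes.append(n - sum(sizes))#παιρνει οτι εχει μεινει
--     boundaries.append(sorted_ages[-1])
--
--     return boundaries, sizes
-- ===== SOURCE B (Python) =====
-- def equidepth(ages, bins):
--     n = len(ages)
--     q, r = divmod(n, bins)
--     # frequency table over the distinct values: no sort of the full list
--     freq = {}
--     for a in ages:
--         freq[a] = freq.get(a, 0) + 1
--     vals = sorted(freq)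
--     cuts = [k * q + min(k, r) for k in range(1, bins)]
--     # scan distinct values once; emit a boundary each time the running
--     # cumulative count reaches the next cut position
--     boundaries = []
--     ci = 0
--     cum = 0
--     for v in vals:
--         cum += freq[v]
--         while ci < len(cuts) and cuts[ci] <= cum:
--             boundaries.append(v)
--             ci += 1
--     boundaries.append(vals[-1])
--     sizes = [c - p for p, c in zip([0] + cuts, cuts)]
--     sizes.append(n - (cuts[-1] if cuts else 0))
--     return boundaries, sizes
-- ===== Notes on version B (the rewrite author's own statement) =====
-- stated objective: alternative
-- what changed: Instead of sorting the whole list and indexing into it, B builds a frequency table of the distinct values, sorts only the distinct values, and finds each bin boundary by a single scan of cumulative frequencies; sizes come from closed-form cut differences instead of a running accumulator.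
-- outside the precondition, e.g. on equidepth([], 2): A raises IndexError, B raises IndexError; on equidepth([1, 2], 0): A raises ZeroDivisionError, B raises ZeroDivisionError
import Mathlib
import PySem

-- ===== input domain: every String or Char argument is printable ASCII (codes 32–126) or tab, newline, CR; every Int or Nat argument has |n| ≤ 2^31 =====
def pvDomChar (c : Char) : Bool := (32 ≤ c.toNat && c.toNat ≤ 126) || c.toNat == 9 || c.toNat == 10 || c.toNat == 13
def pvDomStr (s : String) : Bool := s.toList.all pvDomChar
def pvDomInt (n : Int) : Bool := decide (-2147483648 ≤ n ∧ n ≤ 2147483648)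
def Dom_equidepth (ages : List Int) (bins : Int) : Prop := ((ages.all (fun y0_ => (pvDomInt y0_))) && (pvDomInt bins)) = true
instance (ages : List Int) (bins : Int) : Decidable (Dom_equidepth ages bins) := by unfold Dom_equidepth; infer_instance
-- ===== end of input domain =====

-- B replaces A's full sort + indexing by a frequency table over the distinct values:
-- only the distinct values are sorted and the boundaries are found by one scan of
-- cumulative frequencies (objective: alternative; no speed claim).

-- ===== PORT A =====
-- the loop body of A's 'for i in range(bins - 1)', state = (boundaries, sizes, index)
def stepA (s : List Int) (base rem : Int) (st : List Int × List Int × Int) (i : Int) :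
    List Int × List Int × Int :=
  let size := base + (if i < rem then 1 else 0)
  let index := st.2.2 + size
  (st.1 ++ [PySem.List.pyGetD s (index - 1) 0], st.2.1 ++ [size], index)

def equidepth (ages : List Int) (bins : Int) : List Int × List Int :=
  let sa := PySem.List.sorted ages (fun x => x) false
  let n : Int := sa.length
  let base := PySem.Int.floordiv n bins
  let rem := PySem.Int.mod n bins
  let st := (PySem.List.pyRange 0 (bins - 1) 1).foldl (stepA sa base rem) ([], [], 0)
  (st.1 ++ [PySem.List.pyGetD sa (-1) 0], st.2.1 ++ [n - st.2.1.sum])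

-- ===== PORT B =====
-- Source B's inner 'while rem and rem[0] <= cum: boundaries.append(v); rem = rem[1:]'
def whileB (v cum : Int) : List Int → List Int × List Int
  | [] => ([], [])
  | c :: rest =>
    if c ≤ cum then
      let p := whileB v cum rest
      (v :: p.1, p.2)
    else ([], c :: rest)

-- Source B's outer 'for v in vals', state = (boundaries, remaining cuts, cum)
def stepB (freq : PySem.Dict Int Int) (st : List Int × List Int × Int) (v : Int) :
    List Int × List Int × Int :=
  let cum := st.2.2 + freq.getD v 0
  let p := whileB v cum st.2.1
  (st.1 ++ p.1, p.2, cum)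

def equidepth_alt (ages : List Int) (bins : Int) : List Int × List Int :=
  let n : Int := ages.length
  let q := PySem.Int.floordiv n bins
  let r := PySem.Int.mod n bins
  let freq := PySem.Dict.counter ages
  let vals := PySem.List.sorted freq.keys (fun x => x) false
  let cuts := (PySem.List.pyRange 1 bins 1).map (fun k => k * q + min k r)
  let st := vals.foldl (stepB freq) ([], cuts, 0)
  (st.1 ++ [PySem.List.pyGetD vals (-1) 0],
   ((0 :: cuts).zip cuts).map (fun pc => pc.2 - pc.1) ++ [n - cuts.getLast?.getD 0])

-- ===== PRECONDITION & SPEC =====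
-- A raises on bins = 0 (ZeroDivisionError) and on ages = [] (IndexError at sorted_ages[-1]).
def Pre_equidepth (ages : List Int) (bins : Int) : Prop := ages ≠ [] ∧ bins ≠ 0
instance (ages : List Int) (bins : Int) : Decidable (Pre_equidepth ages bins) := by
  unfold Pre_equidepth; infer_instance
def pvWitness_equidepth : List Int × Int := ([3, 1, 2, 5, 4], 2)

def Spec_equidepth (ages : List Int) (bins : Int) (out : List Int × List Int) : Prop := out = equidepth_alt ages bins
instance (ages : List Int) (bins : Int) (out : List Int × List Int) : Decidable (Spec_equidepth ages bins out) := by unfold Spec_equidepth; infer_instance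

-- ===== CLAIM (what is proved, stated in full; the proofs are below) =====
def Claim_equal_equidepth : Prop := ∀ (ages : List Int) (bins : Int), Dom_equidepth ages bins → Pre_equidepth ages bins → Spec_equidepth ages bins (equidepth ages bins)

-- ===== LEMMAS AND PROOFS =====

-- the multiset of ages laid out by increasing distinct value
def flat (f : Int → Nat) (vals : List Int) : List Int :=
  vals.flatMap (fun v => List.replicate (f v) v)

-- A's loop invariant: starting from index = a*q + min a r, the fold over range a..b
-- produces exactly the closed-form boundaries/sizes, ending at index = (max a b)*q + min (max a b) r.
lemma foldA_range (s : List Int) (q r : Int) :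
    ∀ (m : Nat) (a b : Int), (b - a).toNat = m → ∀ (bd sz : List Int),
    (PySem.List.pyRange a b 1).foldl (stepA s q r) (bd, sz, a * q + min a r)
      = (bd ++ (PySem.List.pyRange a b 1).map
            (fun i => PySem.List.pyGetD s ((i + 1) * q + min (i + 1) r - 1) 0),
         sz ++ (PySem.List.pyRange a b 1).map
            (fun i => ((i + 1) * q + min (i + 1) r) - (i * q + min i r)),
         (max a b) * q + min (max a b) r) := by
  intro m
  induction m with
  | zero =>
    intro a b h bd sz
    have hba : b ≤ a := by omega
    rw [PySem.List.pyRange_one_eq_nil hba]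
    simp [max_eq_left hba]
  | succ m ih =>
    intro a b h bd sz
    have hab : a < b := by omega
    rw [PySem.List.pyRange_one_cons hab]
    simp only [List.foldl_cons, List.map_cons]
    have hstep : stepA s q r (bd, sz, a * q + min a r) a
        = (bd ++ [PySem.List.pyGetD s ((a + 1) * q + min (a + 1) r - 1) 0],
           sz ++ [((a + 1) * q + min (a + 1) r) - (a * q + min a r)],
           (a + 1) * q + min (a + 1) r) := by
      simp only [stepA]
      have h1 : a * q + min a r + (q + (if a < r then 1 else 0)) = (a + 1) * q + min (a + 1) r := by
        by_cases hr : a < r <;> simp [hr] <;> ring_nf <;> omega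
      have h2 : ((a + 1) * q + min (a + 1) r) - (a * q + min a r) = q + (if a < r then 1 else 0) := by
        omega
      rw [h2, h1]
    rw [hstep, ih (a + 1) b (by omega)]
    have hmax : max (a + 1) b = max a b := by omega
    simp [hmax, List.append_assoc]

-- telescoping: the adjacent differences of g over range a..b sum to g (max a b) - g a
lemma sum_diffs (g : Int → Int) :
    ∀ (m : Nat) (a b : Int), (b - a).toNat = m →
    ((PySem.List.pyRange a b 1).map (fun i => g (i + 1) - g i)).sum = g (max a b) - g a := by
  intro m
  induction m with
  | zero =>
    intro a b h
    have hba : b ≤ a := by omega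
    rw [PySem.List.pyRange_one_eq_nil hba]
    simp [max_eq_left hba]
  | succ m ih =>
    intro a b h
    have hab : a < b := by omega
    rw [PySem.List.pyRange_one_cons hab]
    simp only [List.map_cons, List.sum_cons]
    rw [ih (a + 1) b (by omega)]
    have hmax : max (a + 1) b = max a b := by omega
    rw [hmax]; ring

-- zip of a shifted copy computes exactly the adjacent differences
lemma zip_diffs (g : Int → Int) :
    ∀ (m : Nat) (a b : Int), (b - a).toNat = m →
    ((g a :: (PySem.List.pyRange a b 1).map (fun i => g (i + 1))).zip
        ((PySem.List.pyRange a b 1).map (fun i => g (i + 1)))).map (fun pc => pc.2 - pc.1)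
      = (PySem.List.pyRange a b 1).map (fun i => g (i + 1) - g i) := by
  intro m
  induction m with
  | zero =>
    intro a b h
    have hba : b ≤ a := by omega
    rw [PySem.List.pyRange_one_eq_nil hba]; simp
  | succ m ih =>
    intro a b h
    have hab : a < b := by omega
    rw [PySem.List.pyRange_one_cons hab]
    simp only [List.map_cons, List.zip_cons_cons, List.map]
    rw [ih (a + 1) b (by omega)]

-- last element of the mapped range
lemma getLast_map_range (g : Int → Int) (a b : Int) (h : a < b) (d : Int) :
    ((PySem.List.pyRange a b 1).map g).getLast?.getD d = g (b - 1) := by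
  have hb : b = (b - 1) + 1 := by omega
  rw [hb, PySem.List.pyRange_one_succ_right (by omega)]
  simp

-- whileB is takeWhile/dropWhile
lemma whileB_eq (v cum : Int) (cuts : List Int) :
    whileB v cum cuts = ((cuts.takeWhile (fun c => decide (c ≤ cum))).map (fun _ => v),
                         cuts.dropWhile (fun c => decide (c ≤ cum))) := by
  induction cuts with
  | nil => simp [whileB]
  | cons c rest ih =>
    by_cases h : c ≤ cum <;> simp [whileB, h, ih]

-- in a ≤-sorted list, everything surviving dropWhile (≤ m) is > m
lemma dropWhile_gt (m : Int) (cuts : List Int) (hs : cuts.Pairwise (· ≤ ·)) :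
    ∀ c ∈ cuts.dropWhile (fun c => decide (c ≤ m)), m < c := by
  induction cuts with
  | nil => simp
  | cons a rest ih =>
    intro c hc
    rw [List.dropWhile_cons] at hc
    by_cases h : a ≤ m
    · simp only [h, decide_true, if_true] at hc
      exact ih hs.of_cons c hc
    · simp only [h, decide_false] at hc
      rcases List.mem_cons.mp hc with rfl | hmem
      · omega
      · have := (List.pairwise_cons.mp hs).1 c hmem; omega

-- pyGetD on an append, right part
lemma pyGetD_append_right (xs ys : List Int) (i : Int) (d : Int)
    (h : (xs.length : Int) ≤ i) :
    PySem.List.pyGetD (xs ++ ys) i d = PySem.List.pyGetD ys (i - xs.length) d := by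
  have h0 : (0 : Int) ≤ i := le_trans (Int.natCast_nonneg _) h
  rw [PySem.List.pyGetD_of_nonneg _ _ h0, PySem.List.pyGetD_of_nonneg _ _ (by omega)]
  unfold List.getD
  rw [List.getElem?_append_right (by omega)]
  have hidx : i.toNat - xs.length = (i - (xs.length : Int)).toNat := by omega
  rw [hidx]

-- the main scan invariant for B's fold: given sorted cuts strictly between cum and
-- cum + (total weight of vals), the fold emits exactly the flat-layout elements at the cuts
lemma scanB (freq : PySem.Dict Int Int) (f : Int → Nat)
    (hf : ∀ v, freq.getD v 0 = (f v : Int)) :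
    ∀ (vals cuts acc : List Int) (cum : Int),
      cuts.Pairwise (· ≤ ·) →
      (∀ c ∈ cuts, cum < c ∧ c ≤ cum + ((vals.map (fun v => (f v : Int))).sum)) →
      (vals.foldl (stepB freq) (acc, cuts, cum)).1
        = acc ++ cuts.map (fun c => PySem.List.pyGetD (flat f vals) (c - cum - 1) 0) := by
  intro vals
  induction vals with
  | nil =>
    intro cuts acc cum _ hb
    cases cuts with
    | nil => simp
    | cons c rest =>
      have h1 := hb c (by simp)
      simp only [List.map_nil, List.sum_nil, add_zero] at h1
      exact absurd h1 (by omega)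
  | cons v vs ih =>
    intro cuts acc cum hs hb
    simp only [List.foldl_cons, stepB, hf v]
    rw [whileB_eq]
    set cum' := cum + (f v : Int) with hcum'
    set tk := cuts.takeWhile (fun c => decide (c ≤ cum')) with htk
    set dp := cuts.dropWhile (fun c => decide (c ≤ cum')) with hdp
    have hsplit : cuts = tk ++ dp := (List.takeWhile_append_dropWhile).symm
    have hdpmem : ∀ c ∈ dp, c ∈ cuts := fun c hc => hsplit ▸ List.mem_append_right _ hc
    have hdp_s : dp.Pairwise (· ≤ ·) := hs.sublist (List.dropWhile_sublist _)
    have hdp_gt : ∀ c ∈ dp, cum' < c := dropWhile_gt cum' cuts hs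
    rw [ih dp (acc ++ tk.map (fun _ => v)) cum' hdp_s ?hbnd]
    case hbnd =>
      intro c hc
      refine ⟨hdp_gt c hc, ?_⟩
      have := (hb c (hdpmem c hc)).2
      simp only [List.map_cons, List.sum_cons] at this ⊢
      omega
    have hmapsplit : cuts.map (fun c => PySem.List.pyGetD (flat f (v :: vs)) (c - cum - 1) 0)
        = tk.map (fun c => PySem.List.pyGetD (flat f (v :: vs)) (c - cum - 1) 0)
          ++ dp.map (fun c => PySem.List.pyGetD (flat f (v :: vs)) (c - cum - 1) 0) := by
      rw [hsplit, List.map_append]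
    have htkmap : tk.map (fun c => PySem.List.pyGetD (flat f (v :: vs)) (c - cum - 1) 0)
        = tk.map (fun _ => v) := by
      apply List.map_congr_left
      intro c hc
      have hle : c ≤ cum' := by
        have := List.mem_takeWhile_imp (htk ▸ hc); simpa using this
      have hgt : cum < c := (hb c (hsplit ▸ List.mem_append_left _ hc)).1
      have hidx0 : (0 : Int) ≤ c - cum - 1 := by omega
      unfold flat
      rw [List.flatMap_cons,
        PySem.List.pyGetD_eq_getElem _ 0 hidx0 (by simp only [List.length_append, List.length_replicate]; push_cast; omega)]
      rw [List.getElem_append_left (by simp only [List.length_replicate]; omega)]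
      exact List.getElem_replicate _
    have hdpmap : dp.map (fun c => PySem.List.pyGetD (flat f (v :: vs)) (c - cum - 1) 0)
        = dp.map (fun c => PySem.List.pyGetD (flat f vs) (c - cum' - 1) 0) := by
      apply List.map_congr_left
      intro c hc
      have hgt : cum' < c := hdp_gt c hc
      unfold flat
      rw [List.flatMap_cons, pyGetD_append_right _ _ _ _ (by simp; omega)]
      congr 1
      simp; omega
    rw [hmapsplit, htkmap, hdpmap, List.append_assoc]

-- counting in the flat layout
lemma count_flat (f : Int → Nat) (vals : List Int) (h : vals.Nodup) (x : Int) :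
    (flat f vals).count x = if x ∈ vals then f x else 0 := by
  induction vals with
  | nil => simp [flat]
  | cons v vs ih =>
    unfold flat at *
    rw [List.flatMap_cons, List.count_append, ih h.of_cons, List.count_replicate]
    rcases eq_or_ne x v with rfl | hne
    · have : x ∉ vs := (List.nodup_cons.mp h).1
      simp [this]
    · simp [hne, Ne.symm hne, List.mem_cons]

-- the flat layout over strictly increasing vals is ≤-sorted
lemma flat_pairwise (f : Int → Nat) (vals : List Int) (h : vals.Pairwise (· < ·)) :
    (flat f vals).Pairwise (· ≤ ·) := by
  induction vals with
  | nil => simp [flat]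
  | cons v vs ih =>
    unfold flat at *
    rw [List.flatMap_cons]
    apply List.pairwise_append.mpr
    refine ⟨List.pairwise_replicate.mpr (by simp), ih h.of_cons, ?_⟩
    intro a ha b hb
    have ha' : a = v := (List.eq_of_mem_replicate ha)
    obtain ⟨w, hw, hbw⟩ := List.mem_flatMap.mp hb
    have hb' : b = w := List.eq_of_mem_replicate hbw
    have := (List.pairwise_cons.mp h).1 w hw
    omega

-- sorted ages IS the flat layout of counts over the sorted distinct values
lemma sorted_eq_flat (ages : List Int) :
    PySem.List.sorted ages (fun x => x) false
      = flat (fun v => ages.count v)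
          (PySem.List.sorted (PySem.Set.ofList ages) (fun x => x) false) := by
  set vals := PySem.List.sorted (PySem.Set.ofList ages) (fun x => x) false with hv
  have hlt : vals.Pairwise (· < ·) := PySem.List.sorted_ofList_pairwise_lt ages
  have hnd : vals.Nodup := hlt.nodup
  apply PySem.List.sorted_id_eq_of_perm_of_pairwise
  · apply List.perm_iff_count.mpr
    intro x
    rw [count_flat _ _ hnd]
    have hmem : x ∈ vals ↔ x ∈ ages := by
      rw [hv, PySem.List.mem_sorted, PySem.Set.mem_ofList]
    by_cases hx : x ∈ ages
    · rw [if_pos (hmem.mpr hx)]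
    · rw [if_neg (fun h => hx (hmem.mp h)), List.count_eq_zero.mpr hx]
  · exact flat_pairwise _ _ hlt

-- a flat layout over a nonempty vals with positive counts is nonempty
lemma flat_ne_nil (f : Int → Nat) (vals : List Int) (hne : vals ≠ [])
    (hpos : ∀ v ∈ vals, 0 < f v) : flat f vals ≠ [] := by
  cases vals with
  | nil => exact absurd rfl hne
  | cons v vs =>
    unfold flat
    rw [List.flatMap_cons]
    apply List.append_ne_nil_of_left_ne_nil
    apply List.ne_nil_of_length_pos
    rw [List.length_replicate]
    exact hpos v (by simp)

-- last element of the flat layout is the last distinct value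
lemma flat_getLast? (f : Int → Nat) (vals : List Int)
    (hpos : ∀ v ∈ vals, 0 < f v) :
    (flat f vals).getLast? = vals.getLast? := by
  induction vals with
  | nil => rfl
  | cons v vs ih =>
    have hflat : flat f (v :: vs) = List.replicate (f v) v ++ flat f vs := by
      unfold flat; rw [List.flatMap_cons]
    rw [hflat, List.getLast?_append]
    cases hvs : vs with
    | nil =>
      have hv : 0 < f v := hpos v (by simp)
      cases hfv : f v with
      | zero => omega
      | succ m =>
        subst hvs
        simp [flat, List.getLast?_replicate]
    | cons w ws =>
      have hvs_ne : vs ≠ [] := by simp [hvs]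
      rw [← hvs]
      have hfvs_ne : flat f vs ≠ [] :=
        flat_ne_nil f vs hvs_ne (fun u hu => hpos u (List.mem_cons_of_mem _ hu))
      rw [ih (fun u hu => hpos u (List.mem_cons_of_mem _ hu))]
      rw [List.getLast?_eq_some_getLast hvs_ne]
      rw [List.getLast?_cons, List.getLast?_eq_some_getLast hvs_ne]
      simp

-- pyGetD at -1 of the flat layout equals pyGetD at -1 of vals
lemma flat_getLast (f : Int → Nat) (vals : List Int) (hne : vals ≠ [])
    (hpos : ∀ v ∈ vals, 0 < f v) :
    PySem.List.pyGetD (flat f vals) (-1) 0 = PySem.List.pyGetD vals (-1) 0 := by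
  have hfne : flat f vals ≠ [] := flat_ne_nil f vals hne hpos
  rw [PySem.List.pyGetD_neg_one _ _ hfne, PySem.List.pyGetD_neg_one _ _ hne]
  have h1 := flat_getLast? f vals hpos
  rw [List.getLast?_eq_some_getLast hfne, List.getLast?_eq_some_getLast hne] at h1
  exact Option.some.inj h1

-- fold with no cuts left never emits
lemma foldB_no_cuts (freq : PySem.Dict Int Int) (vals : List Int) :
    ∀ (acc : List Int) (cum : Int),
    vals.foldl (stepB freq) (acc, [], cum) = (acc, [], vals.foldl (fun c v => c + freq.getD v 0) cum) := by
  induction vals with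
  | nil => intro acc cum; simp
  | cons v vs ih =>
    intro acc cum
    simp only [List.foldl_cons, stepB, whileB]
    simpa using ih acc (cum + freq.getD v 0)

-- shared setup facts, proved once
lemma vals_ne_nil (ages : List Int) (hne : ages ≠ []) :
    PySem.List.sorted (PySem.Set.ofList ages) (fun x => x) false ≠ [] := by
  cases ages with
  | nil => exact absurd rfl hne
  | cons a rest =>
    intro h
    have : a ∈ PySem.List.sorted (PySem.Set.ofList (a :: rest)) (fun x => x) false := by
      rw [PySem.List.mem_sorted, PySem.Set.mem_ofList]; simp
    rw [h] at this
    exact absurd this (List.not_mem_nil)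

lemma vals_pos (ages : List Int) :
    ∀ v ∈ PySem.List.sorted (PySem.Set.ofList ages) (fun x => x) false, 0 < ages.count v := by
  intro v hv
  rw [PySem.List.mem_sorted, PySem.Set.mem_ofList] at hv
  exact List.count_pos_iff.mpr hv

-- total weight of the distinct values is the length of ages
lemma vals_sum (ages : List Int) :
    ((PySem.List.sorted (PySem.Set.ofList ages) (fun x => x) false).map
        (fun v => (ages.count v : Int))).sum = (ages.length : Int) := by
  set vals := PySem.List.sorted (PySem.Set.ofList ages) (fun x => x) false with hv
  have h1 : (PySem.List.sorted ages (fun x => x) false).length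
      = (flat (fun v => ages.count v) vals).length := by rw [sorted_eq_flat]
  rw [PySem.List.length_sorted] at h1
  unfold flat at h1
  rw [List.length_flatMap] at h1
  simp only [List.length_replicate] at h1
  rw [h1]
  push_cast
  rw [List.map_map]
  rfl

-- ===== VERDICT (by name: the statement is the Claim_ definition above) =====
theorem equidepth_spec : Claim_equal_equidepth := by
  intro ages bins _ hpre
  obtain ⟨hne, hb0⟩ := hpre
  unfold Spec_equidepth equidepth equidepth_alt
  simp only []
  set sa := PySem.List.sorted ages (fun x => x) false with hsa
  set vals := PySem.List.sorted (PySem.Set.ofList ages) (fun x => x) false with hvals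
  have hkeys : (PySem.Dict.counter ages).keys = PySem.Set.ofList ages :=
    PySem.Dict.keys_counter ages
  rw [hkeys]
  set f : Int → Nat := fun v => ages.count v with hfdef
  have hflat : sa = flat f vals := sorted_eq_flat ages
  have hlen : (sa.length : Int) = (ages.length : Int) := by
    rw [hsa, PySem.List.length_sorted]
  set n : Int := (ages.length : Int) with hn
  rw [hlen]
  set q := PySem.Int.floordiv n bins with hq
  set r := PySem.Int.mod n bins with hr
  set g : Int → Int := fun k => k * q + min k r with hg
  have hposn : 0 < n := by
    rw [hn]
    cases ages with
    | nil => exact absurd rfl hne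
    | cons a rest => simp
  have hvne : vals ≠ [] := vals_ne_nil ages hne
  have hpos : ∀ v ∈ vals, 0 < f v := vals_pos ages
  have hlast : PySem.List.pyGetD sa (-1) 0 = PySem.List.pyGetD vals (-1) 0 := by
    rw [hflat]; exact flat_getLast f vals hvne hpos
  by_cases hb : bins ≤ 1
  · -- bins = 1 or negative: no cuts, single bin
    rw [PySem.List.pyRange_one_eq_nil (show bins - 1 ≤ 0 by omega),
        PySem.List.pyRange_one_eq_nil (show bins ≤ (1 : Int) by omega)]
    simp only [List.map_nil, List.foldl_nil]
    rw [foldB_no_cuts]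
    simp only [List.nil_append, List.zip_nil_right, List.map_nil, List.getLast?_nil,
      Option.getD_none, sub_zero]
    rw [hlast, ← hvals]
    simp
  · -- bins ≥ 2
    have hbpos : (0 : Int) < bins := by omega
    have hq0 : 0 ≤ q := by
      rw [hq, PySem.Int.floordiv_eq_ediv_of_pos hbpos]
      exact Int.ediv_nonneg (by omega) (by omega)
    have hr0 : 0 ≤ r := PySem.Int.mod_nonneg n hbpos
    have hdiv : q * bins + r = n := PySem.Int.floordiv_mul_add_mod n bins
    -- A's loop in closed form
    have hg0 : (0 : Int) * q + min 0 r = 0 := by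
      rw [min_eq_left hr0]; ring
    have hfold := foldA_range sa q r (bins - 1).toNat 0 (bins - 1) (by omega) [] []
    rw [hg0] at hfold
    rw [hfold]
    have hmax : max (0 : Int) (bins - 1) = bins - 1 := by omega
    -- the two index lists coincide
    have hcuts : (PySem.List.pyRange 1 bins 1).map g
        = (PySem.List.pyRange 0 (bins - 1) 1).map (fun i => g (i + 1)) := by
      rw [PySem.List.pyRange_one, PySem.List.pyRange_one, List.map_map, List.map_map]
      have : (bins - 1 - 0).toNat = (bins - (1:Int)).toNat := by omega
      rw [this]
      apply List.map_congr_left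
      intro k _
      show g (1 + (k : Int)) = g ((0 : Int) + (k : Int) + 1)
      norm_num [add_comm]
    rw [hcuts]
    -- B's scan in closed form
    have hsorted_cuts : ((PySem.List.pyRange 0 (bins - 1) 1).map (fun i => g (i + 1))).Pairwise (· ≤ ·) := by
      rw [List.pairwise_map]
      apply (PySem.List.pairwise_lt_pyRange_one 0 (bins - 1)).imp
      intro a b hab
      have h1 : (a + 1) * q ≤ (b + 1) * q := mul_le_mul_of_nonneg_right (by omega) hq0
      have h2 : min (a + 1) r ≤ min (b + 1) r := min_le_min (by omega) le_rfl
      simp only [hg]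
      linarith
    have hbounds : ∀ c ∈ (PySem.List.pyRange 0 (bins - 1) 1).map (fun i => g (i + 1)),
        (0 : Int) < c ∧ c ≤ 0 + ((vals.map (fun v => (f v : Int))).sum) := by
      intro c hc
      obtain ⟨i, hi, rfl⟩ := List.mem_map.mp hc
      rw [PySem.List.mem_pyRange_one] at hi
      have hsum : (vals.map (fun v => (f v : Int))).sum = n := vals_sum ages
      rw [hsum]
      set k := i + 1 with hk
      have hk1 : 1 ≤ k := by omega
      have hkb : k ≤ bins - 1 := by omega
      constructor
      · simp only [hg]
        rcases eq_or_lt_of_le hq0 with hq1 | hq1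
        · -- q = 0, so r = n ≥ 1
          have hq1' : q = 0 := hq1.symm
          rw [hq1'] at hdiv
          simp only [zero_mul, zero_add] at hdiv
          have hmin : (1 : Int) ≤ min k r := le_min hk1 (by omega)
          have hkq : k * q = 0 := by rw [hq1']; ring
          linarith
        · have hkq : 0 < k * q := mul_pos (by omega) hq1
          have hmin : 0 ≤ min k r := le_min (by omega) hr0
          linarith
      · simp only [hg]
        have h1 : k * q ≤ (bins - 1) * q := mul_le_mul_of_nonneg_right hkb hq0
        have h2 : min k r ≤ r := min_le_right _ _
        have h3 : (bins - 1) * q = q * bins - q := by ring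
        linarith
    have hscan := scanB (PySem.Dict.counter ages) f
      (fun v => PySem.Dict.getD_counter ages v) vals
      ((PySem.List.pyRange 0 (bins - 1) 1).map (fun i => g (i + 1))) [] 0
      hsorted_cuts hbounds
    rw [hscan]
    rw [← hflat]
    -- boundaries agree
    have hbd : ((PySem.List.pyRange 0 (bins - 1) 1).map (fun i => g (i + 1))).map
          (fun c => PySem.List.pyGetD sa (c - 0 - 1) 0)
        = (PySem.List.pyRange 0 (bins - 1) 1).map
          (fun i => PySem.List.pyGetD sa ((i + 1) * q + min (i + 1) r - 1) 0) := by
      rw [List.map_map]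
      apply List.map_congr_left
      intro i _
      show PySem.List.pyGetD sa (g (i + 1) - 0 - 1) 0 = _
      simp only [hg]
      norm_num
    rw [hbd]
    -- sizes agree
    have hsz := zip_diffs g (bins - 1).toNat 0 (bins - 1) (by omega)
    have hsum := sum_diffs g (bins - 1).toNat 0 (bins - 1) (by omega)
    have hgz : g 0 = 0 := by simp only [hg]; rw [min_eq_left hr0]; ring
    rw [hgz] at hsz hsum
    have hlastc := getLast_map_range (fun i => g (i + 1)) 0 (bins - 1) (by omega) 0
    simp only [List.nil_append]
    rw [hsz, hsum, hlastc, hmax]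
    have h1 : (bins - 1 - 1 + 1) = bins - 1 := by omega
    rw [h1]
    simp only [hg]
    norm_num
    rw [hlast, ← hvals]
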